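-- pv_equiv track=rewrite | github.com/elinik0108/argument-builder-ABA | argument_builder.py | find_defeats
-- ===== SOURCE A (Python) =====
-- def find_defeats(moderation_arguments, contrary):
--     defeats = []
--     for attacker in moderation_arguments:
--         _, attacker_verdict = attacker
--         for target in moderation_arguments:
--             target_support, _ = target
--             for default in target_support:
--                 if default in contrary and attacker_verdict == contrary[default]:
--                     defeats.append((attacker, target))
--                     break
--     return defeats
-- ===== SOURCE B (Python) =====
-- def find_defeats(moderation_arguments, contrary):
--     index = {}
--     for target in moderation_arguments:
--         target_support, _ = target
--         for verdict in {contrary[d] for d in target_support if d in contrary}: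
--             index.setdefault(verdict, []).append(target)
--     defeats = []
--     for attacker in moderation_arguments:
--         _, attacker_verdict = attacker
--         for target in index.get(attacker_verdict, []):
--             defeats.append((attacker, target))
--     return defeats
-- ===== Notes on version B (the rewrite author's own statement) =====
-- stated objective: faster
-- what changed: Replaces A's nested attacker-by-target scan (with an inner default loop and break) by a single pass that builds a verdict-to-targets index dict, then one lookup pass over attackers.
import Mathlib
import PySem

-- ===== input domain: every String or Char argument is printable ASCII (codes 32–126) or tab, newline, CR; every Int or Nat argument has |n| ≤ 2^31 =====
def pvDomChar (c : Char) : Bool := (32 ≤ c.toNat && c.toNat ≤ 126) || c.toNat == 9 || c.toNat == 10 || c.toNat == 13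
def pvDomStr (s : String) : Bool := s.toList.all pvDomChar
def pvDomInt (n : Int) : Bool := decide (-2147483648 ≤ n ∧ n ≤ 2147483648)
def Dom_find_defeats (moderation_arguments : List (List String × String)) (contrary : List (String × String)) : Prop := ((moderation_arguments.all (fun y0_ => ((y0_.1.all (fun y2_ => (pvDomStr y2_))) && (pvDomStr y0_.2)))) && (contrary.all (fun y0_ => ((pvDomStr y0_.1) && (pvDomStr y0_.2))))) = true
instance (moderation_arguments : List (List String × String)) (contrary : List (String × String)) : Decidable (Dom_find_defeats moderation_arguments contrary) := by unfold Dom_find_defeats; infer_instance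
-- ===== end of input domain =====

-- B replaces A's nested scan (every attacker × every target × every default) by one pass that
-- builds a verdict→targets index, then a single lookup pass over attackers (objective: faster).

-- ===== PORT A =====
-- inner 'for default in target_support: if default in contrary and v == contrary[default]: append; break'
-- — the loop appends at most once and breaks, so it is ported as the boolean 'some default
-- matches', scanning the defaults front to back exactly as A does
def pvHitA (cd : PySem.Dict String String) (verdict : String) : List String → Bool
  | [] => false
  | d :: rest =>
    match PySem.Dict.get? cd d with
    | some cv => if verdict == cv then true else pvHitA cd verdict rest
    | none => pvHitA cd verdict rest

def find_defeats (moderation_arguments : List (List String × String)) (contrary : List (String × String)) : List ((List String × String) × (List String × String)) :=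
  moderation_arguments.foldl (fun defeats attacker =>
    moderation_arguments.foldl (fun defeats target =>
      if pvHitA (PySem.Dict.ofList contrary) attacker.2 target.1 then defeats ++ [(attacker, target)] else defeats)
      defeats) []

-- ===== PORT B =====
-- {contrary[d] for d in target_support if d in contrary}
def pvVerdicts (cd : PySem.Dict String String) (support : List String) : PySem.Set String :=
  PySem.Set.ofList (support.filterMap (fun d => PySem.Dict.get? cd d))

-- for verdict in …: index.setdefault(verdict, []).append(target)
def pvIndex (moderation_arguments : List (List String × String)) (cd : PySem.Dict String String) : PySem.Dict String (List (List String × String)) :=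
  moderation_arguments.foldl (fun idx target =>
    (pvVerdicts cd target.1).foldl
      (fun idx verdict => PySem.Dict.modify idx verdict [] (fun l => l ++ [target])) idx)
    PySem.Dict.empty

def find_defeats_alt (moderation_arguments : List (List String × String)) (contrary : List (String × String)) : List ((List String × String) × (List String × String)) :=
  moderation_arguments.foldl (fun defeats attacker =>
    (PySem.Dict.getD (pvIndex moderation_arguments (PySem.Dict.ofList contrary)) attacker.2 []).foldl
      (fun defeats target => defeats ++ [(attacker, target)]) defeats) []

-- ===== PRECONDITION & SPEC =====
def Spec_find_defeats (moderation_arguments : List (List String × String)) (contrary : List (String × String)) (out : List ((List String × String) × (List String × String))) : Prop := out = find_defeats_alt moderation_arguments contrary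
instance (moderation_arguments : List (List String × String)) (contrary : List (String × String)) (out : List ((List String × String) × (List String × String))) : Decidable (Spec_find_defeats moderation_arguments contrary out) := by unfold Spec_find_defeats; infer_instance

-- ===== CLAIM (what is proved, stated in full; the proofs are below) =====
def Claim_equal_find_defeats : Prop := ∀ (moderation_arguments : List (List String × String)) (contrary : List (String × String)), Dom_find_defeats moderation_arguments contrary → Spec_find_defeats moderation_arguments contrary (find_defeats moderation_arguments contrary)

-- ===== LEMMAS AND PROOFS =====

-- A's inner default scan succeeds iff the verdict is among the target's contrary values
theorem pvHitA_iff (cd : PySem.Dict String String) (v : String) (support : List String) :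
    pvHitA cd v support = true ↔ v ∈ support.filterMap (fun d => PySem.Dict.get? cd d) := by
  induction support with
  | nil => simp [pvHitA]
  | cons d rest ih =>
    simp only [pvHitA, List.filterMap_cons]
    cases h : PySem.Dict.get? cd d with
    | none => simpa using ih
    | some cv =>
      by_cases hv : v = cv
      · subst hv; simp
      · simp [List.mem_cons, hv, ih, (by simpa using hv : (v == cv) = false)]

-- one target's index update, seen through getD at one verdict
theorem pvGetD_set_fold (t : List String × String) (v : String) :
    ∀ (s : List String), s.Nodup → ∀ (idx : PySem.Dict String (List (List String × String))),
      PySem.Dict.getD (s.foldl (fun idx verdict => PySem.Dict.modify idx verdict [] (fun l => l ++ [t])) idx) v []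
        = PySem.Dict.getD idx v [] ++ (if v ∈ s then [t] else []) := by
  intro s
  induction s with
  | nil => intro _ idx; simp
  | cons u rest ih =>
    intro hnd idx
    rcases List.nodup_cons.mp hnd with ⟨hu, hrest⟩
    simp only [List.foldl_cons]
    rw [ih hrest]
    rw [PySem.Dict.getD_modify]
    by_cases hv : v = u
    · subst hv
      simp [hu]
    · simp [hv, List.mem_cons]

-- the built index, read at a verdict, lists exactly the targets A's inner scan accepts
theorem pvIndex_getD (cd : PySem.Dict String String) (v : String) :
    ∀ (ma : List (List String × String)) (idx : PySem.Dict String (List (List String × String))),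
      PySem.Dict.getD (ma.foldl (fun idx target =>
          (pvVerdicts cd target.1).foldl
            (fun idx verdict => PySem.Dict.modify idx verdict [] (fun l => l ++ [target])) idx) idx) v []
        = PySem.Dict.getD idx v [] ++ ma.filter (fun t => pvHitA cd v t.1) := by
  intro ma
  induction ma with
  | nil => intro idx; simp
  | cons t rest ih =>
    intro idx
    simp only [List.foldl_cons, List.filter_cons]
    rw [ih]
    have hnd : (pvVerdicts cd t.1).Nodup := by
      unfold pvVerdicts; exact PySem.Set.nodup_ofList _
    rw [pvGetD_set_fold t v _ hnd]
    have hmem : (v ∈ pvVerdicts cd t.1) ↔ pvHitA cd v t.1 = true := by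
      unfold pvVerdicts; rw [pvHitA_iff, PySem.Set.mem_ofList]
    by_cases h : pvHitA cd v t.1 = true
    · simp [h, hmem.mpr h, List.append_assoc]
    · have hnm : v ∉ pvVerdicts cd t.1 := fun hc => h (hmem.mp hc)
      simp [h, hnm]

-- ===== VERDICT (by name: the statement is the Claim_ definition above) =====
theorem find_defeats_spec : Claim_equal_find_defeats := by
  intro ma contrary _
  show find_defeats ma contrary = find_defeats_alt ma contrary
  unfold find_defeats find_defeats_alt
  have hidx : ∀ (a : List String × String),
      PySem.Dict.getD (pvIndex ma (PySem.Dict.ofList contrary)) a.2 []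
        = ma.filter (fun t => pvHitA (PySem.Dict.ofList contrary) a.2 t.1) := by
    intro a
    unfold pvIndex
    rw [pvIndex_getD]
    simp
  have hstep : (fun (defeats : List ((List String × String) × (List String × String))) attacker =>
        ma.foldl (fun defeats target =>
          if pvHitA (PySem.Dict.ofList contrary) attacker.2 target.1 then defeats ++ [(attacker, target)] else defeats) defeats)
      = (fun defeats attacker =>
        (PySem.Dict.getD (pvIndex ma (PySem.Dict.ofList contrary)) attacker.2 []).foldl
          (fun defeats target => defeats ++ [(attacker, target)]) defeats) := by
    funext defeats attacker
    rw [PySem.List.foldl_append_if (fun t : List String × String => pvHitA (PySem.Dict.ofList contrary) attacker.2 t.1)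
          (fun t : List String × String => (attacker, t)) ma defeats,
        PySem.List.foldl_append_singleton_eq_map, hidx]
  rw [hstep]
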